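-- pv_equiv track=rewrite | github.com/mostafasaad91/Football-Match-Analysis | Analyzer.py | _dominant_lane
-- ===== SOURCE A (Python) =====
-- def _dominant_lane(left, middle, right):
--     values = {"left": left, "middle": middle, "right": right}
--     top_val = max(values.values()) if values else 0
--     if top_val == 0:
--         return "without a clear preferred lane"
--     winners = [k for k, v in values.items() if v == top_val]
--     if len(winners) > 1:
--         return "without a single dominant lane"
--     labels = {
--         "left": "down the left",
--         "middle": "through the central lane",
--         "right": "down the right",
--     }
--     return labels[winners[0]]
-- ===== SOURCE B (Python) =====
-- def _dominant_lane(left, middle, right):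
--     pairs = sorted([(left, "left"), (middle, "middle"), (right, "right")],
--                    key=lambda p: p[0], reverse=True)
--     if pairs[0][0] == 0:
--         return "without a clear preferred lane"
--     if pairs[0][0] == pairs[1][0]:
--         return "without a single dominant lane"
--     labels = {
--         "left": "down the left",
--         "middle": "through the central lane",
--         "right": "down the right",
--     }
--     return labels[pairs[0][1]]
-- ===== Notes on version B (the rewrite author's own statement) =====
-- stated objective: alternative
-- what changed: Replaces the dict + max + tie-counting comprehension by sorting the three (value,label) pairs descending and inspecting only the top two entries.
import Mathlib
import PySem

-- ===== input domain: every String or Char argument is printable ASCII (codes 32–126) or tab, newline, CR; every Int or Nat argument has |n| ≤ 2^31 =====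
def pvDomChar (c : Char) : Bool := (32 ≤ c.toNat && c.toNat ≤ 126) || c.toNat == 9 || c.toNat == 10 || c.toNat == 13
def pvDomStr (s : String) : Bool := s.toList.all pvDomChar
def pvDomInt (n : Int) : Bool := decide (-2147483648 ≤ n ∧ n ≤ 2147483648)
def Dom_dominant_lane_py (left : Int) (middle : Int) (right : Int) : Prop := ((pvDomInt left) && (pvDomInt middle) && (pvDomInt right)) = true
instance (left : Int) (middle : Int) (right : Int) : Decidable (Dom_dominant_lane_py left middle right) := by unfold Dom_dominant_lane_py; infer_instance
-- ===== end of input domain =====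

-- B sorts the three (value,label) pairs descending and inspects the top two, instead of A's dict + max + tie-counting comprehension (alternative decomposition, same cost).


-- ===== PORT A =====
def dominant_lane_py (left : Int) (middle : Int) (right : Int) : String :=
  let values : PySem.Dict String Int :=
    PySem.Dict.ofList [("left", left), ("middle", middle), ("right", right)]
  -- 'max(values.values()) if values else 0': values is nonempty, so max? is some; getD 0 covers the (unreachable) empty branch
  let top_val : Int := (PySem.List.max? values.values (fun v => v)).getD 0
  if top_val = 0 then "without a clear preferred lane"
  else
    let winners : List String := (values.items.filter (fun p => p.2 = top_val)).map Prod.fst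
    if winners.length > 1 then "without a single dominant lane"
    else
      let labels : PySem.Dict String String :=
        PySem.Dict.ofList [("left", "down the left"), ("middle", "through the central lane"), ("right", "down the right")]
      -- labels[winners[0]]: winners is nonempty here and its element is a key of labels, so the lookups never raise
      labels.getD (PySem.List.pyGetD winners 0 "") ""

-- ===== PORT B =====
def dominant_lane_py_alt (left : Int) (middle : Int) (right : Int) : String :=
  let pairs : List (Int × String) :=
    PySem.List.sorted [(left, "left"), (middle, "middle"), (right, "right")] (fun p => p.1) true
  -- pairs has exactly three elements, so pairs[0] / pairs[1] never raise; match transcribes the two indexings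
  match pairs with
  | (v0, l0) :: (v1, _) :: _ =>
    if v0 = 0 then "without a clear preferred lane"
    else if v0 = v1 then "without a single dominant lane"
    else
      (PySem.Dict.ofList [("left", "down the left"), ("middle", "through the central lane"), ("right", "down the right")]).getD l0 ""
  | _ => ""  -- unreachable: the sorted list keeps length 3

-- ===== PRECONDITION & SPEC =====
def Spec_dominant_lane_py (left : Int) (middle : Int) (right : Int) (out : String) : Prop := out = dominant_lane_py_alt left middle right
instance (left : Int) (middle : Int) (right : Int) (out : String) : Decidable (Spec_dominant_lane_py left middle right out) := by unfold Spec_dominant_lane_py; infer_instance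

-- ===== CLAIM (what is proved, stated in full; the proofs are below) =====
def Claim_equal_dominant_lane_py : Prop := ∀ (left : Int) (middle : Int) (right : Int), Dom_dominant_lane_py left middle right → Spec_dominant_lane_py left middle right (dominant_lane_py left middle right)

-- ===== LEMMAS AND PROOFS =====

-- ===== VERDICT (by name: the statement is the Claim_ definition above) =====
set_option maxHeartbeats 2000000 in
set_option maxRecDepth 8000 in
theorem dominant_lane_py_spec : Claim_equal_dominant_lane_py := by
  intro l m r _
  unfold Spec_dominant_lane_py dominant_lane_py dominant_lane_py_alt
  rcases lt_trichotomy l m with h1 | h1 | h1 <;>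
    rcases lt_trichotomy m r with h2 | h2 | h2 <;>
      rcases lt_trichotomy l r with h3 | h3 | h3 <;>
        first
          | omega
          | ((try subst h1) <;> (try subst h2) <;> (try subst h3) <;>
             (try have n1 : l ≠ m := by omega) <;> (try have n1' : m ≠ l := by omega) <;>
             (try have n2 : m ≠ r := by omega) <;> (try have n2' : r ≠ m := by omega) <;>
             (try have n3 : l ≠ r := by omega) <;> (try have n3' : r ≠ l := by omega) <;>
             (try have p1 : ¬ l < m := by omega) <;> (try have p1' : ¬ m < l := by omega) <;>
             (try have p2 : ¬ m < r := by omega) <;> (try have p2' : ¬ r < m := by omega) <;>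
             (try have p3 : ¬ l < r := by omega) <;> (try have p3' : ¬ r < l := by omega) <;>
             simp [PySem.Dict.ofList, PySem.List.max?, PySem.List.sorted, PySem.Dict.values,
                   PySem.Dict.getD, PySem.Dict.get?, PySem.List.pyGetD, PySem.Dict.update,
                   PySem.Dict.empty, PySem.Dict.insert, PySem.List.insertBy, PySem.Dict.contains,
                   List.filter, *] <;>
             omega)
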